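-- pv_equiv track=rewrite | github.com/sproutsai-engg/coding_question_generator | json_files/python_codes/Q_1319.py | unique_occurrences
-- ===== SOURCE A (Python) =====
-- def unique_occurrences(arr):
--     counts = {}
--     for num in arr:
--         counts[num] = counts.get(num, 0) + 1
--
--     unique_counts = set()
--     for count in counts.values():
--         if count in unique_counts:
--             return False
--         unique_counts.add(count)
--
--     return True
-- ===== SOURCE B (Python) =====
-- def unique_occurrences(arr):
--     counts = {}
--     for num in arr:
--         counts[num] = counts.get(num, 0) + 1
--     vals = sorted(counts.values())
--     for prev, cur in zip(vals, vals[1:]):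
--         if prev == cur:
--             return False
--     return True
-- ===== Notes on version B (the rewrite author's own statement) =====
-- stated objective: alternative
-- what changed: The second pass no longer maintains a hash set of seen counts: B sorts the list of count values once and detects a duplicate by a single adjacent-pair scan over the sorted list.
import Mathlib
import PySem

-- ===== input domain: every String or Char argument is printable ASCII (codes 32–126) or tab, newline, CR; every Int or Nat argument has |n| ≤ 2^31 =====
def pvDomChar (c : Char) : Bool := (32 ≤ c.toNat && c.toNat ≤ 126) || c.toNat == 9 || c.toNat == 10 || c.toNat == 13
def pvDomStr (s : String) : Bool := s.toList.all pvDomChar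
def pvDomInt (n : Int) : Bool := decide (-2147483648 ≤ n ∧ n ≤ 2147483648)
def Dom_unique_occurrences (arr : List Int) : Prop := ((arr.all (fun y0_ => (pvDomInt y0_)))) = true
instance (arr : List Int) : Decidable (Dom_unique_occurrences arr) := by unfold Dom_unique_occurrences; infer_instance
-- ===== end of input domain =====

-- B replaces A's hash-set second pass by sorting the count values and scanning adjacent pairs (alternative algorithm, same results).

-- ===== PORT A =====
-- A's second loop: for count in counts.values(): if count in unique_counts: return False; unique_counts.add(count)
def uoSetScan : List Int → PySem.Set Int → Bool
  | [], _ => true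
  | c :: rest, seen =>
      if PySem.Set.contains seen c then false
      else uoSetScan rest (PySem.Set.add seen c)

def unique_occurrences (arr : List Int) : Bool :=
  let counts := arr.foldl (fun d num => d.insert num (d.getD num 0 + 1)) PySem.Dict.empty
  uoSetScan counts.values PySem.Set.empty

-- ===== PORT B =====
-- B's loop: for prev, cur in zip(vals, vals[1:]): if prev == cur: return False
def uoAdjScan : List (Int × Int) → Bool
  | [] => true
  | (p, c) :: rest => if p == c then false else uoAdjScan rest

def unique_occurrences_alt (arr : List Int) : Bool :=
  let counts := arr.foldl (fun d num => d.insert num (d.getD num 0 + 1)) PySem.Dict.empty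
  let vals := PySem.List.sorted counts.values (fun x => x) false
  uoAdjScan (vals.zip (PySem.List.slice vals (some 1) none))

-- ===== PRECONDITION & SPEC =====
def Spec_unique_occurrences (arr : List Int) (out : Bool) : Prop := out = unique_occurrences_alt arr
instance (arr : List Int) (out : Bool) : Decidable (Spec_unique_occurrences arr out) := by unfold Spec_unique_occurrences; infer_instance

-- ===== CLAIM (what is proved, stated in full; the proofs are below) =====
def Claim_equal_unique_occurrences : Prop := ∀ (arr : List Int), Dom_unique_occurrences arr → Spec_unique_occurrences arr (unique_occurrences arr)

-- ===== LEMMAS AND PROOFS =====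

-- A's scan with a seen-set returns true iff the remaining list is duplicate-free and disjoint from the set.
theorem uoSetScan_true_iff (l : List Int) (s : PySem.Set Int) :
    uoSetScan l s = true ↔ l.Nodup ∧ ∀ x ∈ l, x ∉ s := by
  induction l generalizing s with
  | nil => simp [uoSetScan]
  | cons c rest ih =>
      simp only [uoSetScan]
      by_cases h : PySem.Set.contains s c = true
      · simp only [h, if_true]
        rw [PySem.Set.contains_iff] at h
        constructor
        · intro hfalse; cases hfalse
        · rintro ⟨-, hdis⟩
          exact absurd h (hdis c (by simp))
      · have hns : c ∉ s := fun hc => by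
          rw [← PySem.Set.contains_iff] at hc; exact h hc
        simp only [h, Bool.false_eq_true, if_false, ih, List.nodup_cons, List.mem_cons]
        constructor
        · rintro ⟨hn, hdis⟩
          refine ⟨⟨fun hc => (hdis c hc) (by simp [PySem.Set.mem_add]), hn⟩, ?_⟩
          rintro x (rfl | hx)
          · exact hns
          · exact fun hxs => (hdis x hx) (by simp [PySem.Set.mem_add, hxs])
        · rintro ⟨⟨hc, hn⟩, hdis⟩
          refine ⟨hn, fun x hx hxadd => ?_⟩
          rw [PySem.Set.mem_add] at hxadd
          rcases hxadd with hxs | rfl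
          · exact (hdis x (Or.inr hx)) hxs
          · exact hc hx

-- B's adjacent-pair scan returns true iff no two neighbours are equal.
theorem uoAdjScan_true_iff (l : List Int) :
    uoAdjScan (l.zip l.tail) = true ↔ l.IsChain (· ≠ ·) := by
  induction l with
  | nil => simp [uoAdjScan]
  | cons a t ih =>
      cases t with
      | nil => simp [uoAdjScan]
      | cons b r =>
          simp only [List.tail_cons, List.zip_cons_cons, uoAdjScan, List.isChain_cons_cons]
          by_cases h : a = b
          · simp [h]
          · simp only [List.tail_cons] at ih
            simpa [h] using ih

-- On a ≤-sorted list, adjacent distinctness is exactly Nodup.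
theorem isChain_ne_iff_nodup_of_sorted (l : List Int) (hs : l.Pairwise (· ≤ ·)) :
    l.IsChain (· ≠ ·) ↔ l.Nodup := by
  constructor
  · intro hc
    have hle : l.IsChain (· ≤ ·) := hs.isChain
    have hlt : l.IsChain (· < ·) := by
      clear hs
      induction l with
      | nil => exact List.IsChain.nil
      | cons a t ih =>
          cases t with
          | nil => simp
          | cons b r =>
              rw [List.isChain_cons_cons] at hc hle ⊢
              exact ⟨lt_of_le_of_ne hle.1 hc.1, ih hc.2 hle.2⟩
    have : l.Pairwise (· < ·) := (List.isChain_iff_pairwise).mp hlt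
    exact this.imp ne_of_lt
  · intro hn
    exact hn.isChain

-- Core: A's second pass over a value list equals B's sort-then-adjacent-scan over the same list.
theorem scan_eq (l : List Int) :
    uoSetScan l PySem.Set.empty =
      uoAdjScan ((PySem.List.sorted l (fun x => x) false).zip
        (PySem.List.slice (PySem.List.sorted l (fun x => x) false) (some 1) none)) := by
  set v := PySem.List.sorted l (fun x => x) false with hv
  rw [PySem.List.slice_from_one]
  have hperm : v.Perm l := PySem.List.sorted_perm l _ _
  have hsorted : v.Pairwise (· ≤ ·) := by
    simpa using PySem.List.sorted_pairwise (xs := l) (key := fun x => x)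
  rw [Bool.eq_iff_iff, uoSetScan_true_iff, uoAdjScan_true_iff,
    isChain_ne_iff_nodup_of_sorted v hsorted, hperm.nodup_iff]
  simp [PySem.Set.empty]

-- ===== VERDICT (by name: the statement is the Claim_ definition above) =====
theorem unique_occurrences_spec : Claim_equal_unique_occurrences := by
  intro arr _
  unfold Spec_unique_occurrences unique_occurrences unique_occurrences_alt
  exact scan_eq _
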